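-- pv_equiv track=rewrite | github.com/morietu/jinja_app | backend/temples/services/concierge_explanations.py | _build_need_match_text
-- ===== SOURCE A (Python) =====
-- from typing import Any, Dict, List, Optional
--
-- NEED_LABEL = {
--     "career": "転機・仕事",
--     "study": "学業・合格",
--     "mental": "不安・心",
--     "love": "恋愛",
--     "money": "金運",
--     "rest": "休息",
--     "courage": "前進・後押し",
--     "protection": "厄除け・守護",
--     "focus": "集中・継続",
-- }
--
-- def _build_need_match_text(matched: List[str]) -> str:
--     tags = [str(x).strip() for x in matched if str(x).strip()]
--
--     if not tags:
--         return "今の相談内容に関わる願いごとと重なる神社です。"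
--
--     tag_set = set(tags)
--
--     if "mental" in tag_set and "rest" in tag_set:
--         return "疲れをゆるめ、心を整えながら落ち着いて休息したい気持ちに重なる神社です。"
--
--     if "career" in tag_set and "mental" in tag_set and "courage" in tag_set:
--         return "転職や仕事の不安に向き合いながら、背中を押されるように前へ進みたい気持ちに重なる神社です。"
--
--     if "money" in tag_set and "courage" in tag_set:
--         return "金運を整えつつ、行動のきっかけや前向きな流れを得たい気持ちに重なる神社です。"
--
--     if "career" in tag_set and "courage" in tag_set:
--         return "仕事や転機に向き合いながら、前進や後押しを求める気持ちに重なる神社です。"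
--
--     if "mental" in tag_set and "courage" in tag_set:
--         return "不安を整えながら、前向きに一歩踏み出したい気持ちに重なる神社です。"
--
--     if "love" in tag_set:
--         return "良縁や恋愛を前向きに進めたい気持ちに重なる神社です。"
--
--     if "study" in tag_set:
--         return "学業・合格に向けて、資格や試験へ集中して努力を積み上げたい気持ちに重なる神社です。"
--
--     label = NEED_LABEL.get(tags[0], tags[0])
--     return f"今の相談内容と、{label}に関わる願いごとが重なる神社です。"
-- ===== SOURCE B (Python) =====
-- NEED_LABEL = {
--     "career": "転機・仕事",
--     "study": "学業・合格",
--     "mental": "不安・心",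
--     "love": "恋愛",
--     "money": "金運",
--     "rest": "休息",
--     "courage": "前進・後押し",
--     "protection": "厄除け・守護",
--     "focus": "集中・継続",
-- }
--
-- # bit assigned to each tag that influences the outcome
-- _BITS = [
--     ("mental", 1),
--     ("rest", 2),
--     ("career", 4),
--     ("courage", 8),
--     ("money", 16),
--     ("love", 32),
--     ("study", 64),
-- ]
--
-- # rules in priority order, each as (required bitmask, text)
-- _RULE_MASKS = [
--     (1 | 2, "疲れをゆるめ、心を整えながら落ち着いて休息したい気持ちに重なる神社です。"),
--     (4 | 1 | 8, "転職や仕事の不安に向き合いながら、背中を押されるように前へ進みたい気持ちに重なる神社です。"),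
--     (16 | 8, "金運を整えつつ、行動のきっかけや前向きな流れを得たい気持ちに重なる神社です。"),
--     (4 | 8, "仕事や転機に向き合いながら、前進や後押しを求める気持ちに重なる神社です。"),
--     (1 | 8, "不安を整えながら、前向きに一歩踏み出したい気持ちに重なる神社です。"),
--     (32, "良縁や恋愛を前向きに進めたい気持ちに重なる神社です。"),
--     (64, "学業・合格に向けて、資格や試験へ集中して努力を積み上げたい気持ちに重なる神社です。"),
-- ]
--
-- # precomputed O(1) dispatch table: for each of the 128 possible masks, the
-- # text of the highest-priority rule contained in it (None = fallback)
-- _TEXT_BY_MASK = [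
--     next((t for rm, t in _RULE_MASKS if rm & m == rm), None) for m in range(128)
-- ]
--
--
-- def _build_need_match_text(matched):
--     tags = [str(x).strip() for x in matched if str(x).strip()]
--     if not tags:
--         return "今の相談内容に関わる願いごとと重なる神社です。"
--     tag_set = set(tags)
--     mask = sum(bit for tag, bit in _BITS if tag in tag_set)
--     text = _TEXT_BY_MASK[mask]
--     if text is not None:
--         return text
--     label = NEED_LABEL.get(tags[0], tags[0])
--     return f"今の相談内容と、{label}に関わる願いごとが重なる神社です。"
-- ===== Notes on version B (the rewrite author's own statement) =====
-- stated objective: alternative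
-- what changed: Replaces the hard-coded cascade of seven subset if-branches with a per-tag bitmask (one membership test per relevant tag) and a 128-entry dispatch table precomputed at module load, so rule selection becomes a single O(1) table index instead of per-call rule checks.
import Mathlib
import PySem

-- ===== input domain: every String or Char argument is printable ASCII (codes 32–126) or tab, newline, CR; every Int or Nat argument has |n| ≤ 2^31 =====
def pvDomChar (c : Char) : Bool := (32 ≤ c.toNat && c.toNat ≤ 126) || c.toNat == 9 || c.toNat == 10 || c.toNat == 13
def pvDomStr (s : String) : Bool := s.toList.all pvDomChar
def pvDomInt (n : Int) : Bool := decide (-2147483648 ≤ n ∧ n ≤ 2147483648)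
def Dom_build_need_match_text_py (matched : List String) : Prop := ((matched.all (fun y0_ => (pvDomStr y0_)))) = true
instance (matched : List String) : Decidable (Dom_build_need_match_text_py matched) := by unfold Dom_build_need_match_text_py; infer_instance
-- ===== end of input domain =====

set_option maxRecDepth 8000
set_option maxHeartbeats 2000000

-- B replaces A's cascade of if-branches by a per-tag bitmask and a precomputed 128-entry dispatch table (alternative structure).

-- ===== PORT A =====
def pvNeedLabel : PySem.Dict String String := PySem.Dict.ofList
  [("career", "転機・仕事"), ("study", "学業・合格"), ("mental", "不安・心"),
   ("love", "恋愛"), ("money", "金運"), ("rest", "休息"),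
   ("courage", "前進・後押し"), ("protection", "厄除け・守護"), ("focus", "集中・継続")]

def build_need_match_text_py (matched : List String) : String :=
  let tags := (matched.map (fun x => PySem.Str.strip x)).filter (fun t => t ≠ "")
  if tags = [] then "今の相談内容に関わる願いごとと重なる神社です。"
  else
    let tag_set : PySem.Set String := PySem.Set.ofList tags
    if tag_set.contains "mental" && tag_set.contains "rest" then
      "疲れをゆるめ、心を整えながら落ち着いて休息したい気持ちに重なる神社です。"
    else if tag_set.contains "career" && tag_set.contains "mental" && tag_set.contains "courage" then
      "転職や仕事の不安に向き合いながら、背中を押されるように前へ進みたい気持ちに重なる神社です。"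
    else if tag_set.contains "money" && tag_set.contains "courage" then
      "金運を整えつつ、行動のきっかけや前向きな流れを得たい気持ちに重なる神社です。"
    else if tag_set.contains "career" && tag_set.contains "courage" then
      "仕事や転機に向き合いながら、前進や後押しを求める気持ちに重なる神社です。"
    else if tag_set.contains "mental" && tag_set.contains "courage" then
      "不安を整えながら、前向きに一歩踏み出したい気持ちに重なる神社です。"
    else if tag_set.contains "love" then
      "良縁や恋愛を前向きに進めたい気持ちに重なる神社です。"
    else if tag_set.contains "study" then
      "学業・合格に向けて、資格や試験へ集中して努力を積み上げたい気持ちに重なる神社です。"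
    else
      let label := pvNeedLabel.getD (tags.headD "") (tags.headD "")
      "今の相談内容と、" ++ label ++ "に関わる願いごとが重なる神社です。"

-- ===== PORT B =====
-- bit assigned to each tag that influences the outcome (_BITS in Source B)
def pvBits : List (String × Int) :=
  [("mental", 1), ("rest", 2), ("career", 4), ("courage", 8),
   ("money", 16), ("love", 32), ("study", 64)]

-- rules in priority order as (required bitmask, text) (_RULE_MASKS in Source B; Python's
-- 'x | y' on these nonneg ints is exactly Int.lor)
def pvRuleMasks : List (Int × String) :=
  [(Int.lor 1 2, "疲れをゆるめ、心を整えながら落ち着いて休息したい気持ちに重なる神社です。"),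
   (Int.lor (Int.lor 4 1) 8, "転職や仕事の不安に向き合いながら、背中を押されるように前へ進みたい気持ちに重なる神社です。"),
   (Int.lor 16 8, "金運を整えつつ、行動のきっかけや前向きな流れを得たい気持ちに重なる神社です。"),
   (Int.lor 4 8, "仕事や転機に向き合いながら、前進や後押しを求める気持ちに重なる神社です。"),
   (Int.lor 1 8, "不安を整えながら、前向きに一歩踏み出したい気持ちに重なる神社です。"),
   (32, "良縁や恋愛を前向きに進めたい気持ちに重なる神社です。"),
   (64, "学業・合格に向けて、資格や試験へ集中して努力を積み上げたい気持ちに重なる神社です。")]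

-- 'next((t for rm, t in _RULE_MASKS if rm & m == rm), None)'; Python's '&' on ints is Int.land
def pvFirstRule (m : Int) : List (Int × String) → Option String
  | [] => none
  | (rm, t) :: rest => if Int.land rm m == rm then some t else pvFirstRule m rest

-- the precomputed dispatch table _TEXT_BY_MASK (comprehension over range(128))
def pvTextByMask : List (Option String) :=
  (PySem.List.pyRange 0 128 1).map (fun m => pvFirstRule m pvRuleMasks)

def build_need_match_text_py_alt (matched : List String) : String :=
  let tags := (matched.map (fun x => PySem.Str.strip x)).filter (fun t => t ≠ "")
  if tags = [] then "今の相談内容に関わる願いごとと重なる神社です。"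
  else
    let tag_set : PySem.Set String := PySem.Set.ofList tags
    -- mask = sum(bit for tag, bit in _BITS if tag in tag_set)
    let mask : Int := pvBits.foldl (fun m p => if tag_set.contains p.1 then m + p.2 else m) 0
    -- _TEXT_BY_MASK[mask]: mask is always in [0, 128), so the index never raises
    match (PySem.List.pyGet? pvTextByMask mask).join with
    | some text => text
    | none =>
        let label := pvNeedLabel.getD (tags.headD "") (tags.headD "")
        "今の相談内容と、" ++ label ++ "に関わる願いごとが重なる神社です。"

-- ===== PRECONDITION & SPEC =====
def Spec_build_need_match_text_py (matched : List String) (out : String) : Prop := out = build_need_match_text_py_alt matched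
instance (matched : List String) (out : String) : Decidable (Spec_build_need_match_text_py matched out) := by unfold Spec_build_need_match_text_py; infer_instance

-- ===== CLAIM (what is proved, stated in full; the proofs are below) =====
def Claim_equal_build_need_match_text_py : Prop := ∀ (matched : List String), Dom_build_need_match_text_py matched → Spec_build_need_match_text_py matched (build_need_match_text_py matched)

-- ===== LEMMAS AND PROOFS =====
-- The table lookup at the mask built from the seven membership booleans equals A's
-- branch cascade (finite check over all 2^7 boolean combinations).
theorem pvTable_correct (b1 b2 b3 b4 b5 b6 b7 : Bool) :
    (PySem.List.pyGet? pvTextByMask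
        ((if b1 then (1:Int) else 0) + (if b2 then (2:Int) else 0) + (if b3 then (4:Int) else 0) +
         (if b4 then (8:Int) else 0) + (if b5 then (16:Int) else 0) + (if b6 then (32:Int) else 0) +
         (if b7 then (64:Int) else 0))).join =
      (if b1 && b2 then
        some "疲れをゆるめ、心を整えながら落ち着いて休息したい気持ちに重なる神社です。"
      else if b3 && b1 && b4 then
        some "転職や仕事の不安に向き合いながら、背中を押されるように前へ進みたい気持ちに重なる神社です。"
      else if b5 && b4 then
        some "金運を整えつつ、行動のきっかけや前向きな流れを得たい気持ちに重なる神社です。"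
      else if b3 && b4 then
        some "仕事や転機に向き合いながら、前進や後押しを求める気持ちに重なる神社です。"
      else if b1 && b4 then
        some "不安を整えながら、前向きに一歩踏み出したい気持ちに重なる神社です。"
      else if b6 then
        some "良縁や恋愛を前向きに進めたい気持ちに重なる神社です。"
      else if b7 then
        some "学業・合格に向けて、資格や試験へ集中して努力を積み上げたい気持ちに重なる神社です。"
      else none) := by
  cases b1 <;> cases b2 <;> cases b3 <;> cases b4 <;> cases b5 <;> cases b6 <;> cases b7 <;> rfl

-- B's sum over _BITS filtered by membership, written as seven if-terms.
theorem pvMask_eq (s : PySem.Set String) :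
    pvBits.foldl (fun m p => if s.contains p.1 then m + p.2 else m) 0 =
      (if s.contains "mental" then (1:Int) else 0) + (if s.contains "rest" then (2:Int) else 0) +
      (if s.contains "career" then (4:Int) else 0) + (if s.contains "courage" then (8:Int) else 0) +
      (if s.contains "money" then (16:Int) else 0) + (if s.contains "love" then (32:Int) else 0) +
      (if s.contains "study" then (64:Int) else 0) := by
  simp only [pvBits, List.foldl_cons, List.foldl_nil]
  cases s.contains "mental" <;> cases s.contains "rest" <;> cases s.contains "career" <;>
    cases s.contains "courage" <;> cases s.contains "money" <;> cases s.contains "love" <;>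
    cases s.contains "study" <;> simp

-- ===== VERDICT (by name: the statement is the Claim_ definition above) =====
theorem build_need_match_text_py_spec : Claim_equal_build_need_match_text_py := by
  intro matched _
  unfold Spec_build_need_match_text_py build_need_match_text_py build_need_match_text_py_alt
  set tags := (matched.map (fun x => PySem.Str.strip x)).filter (fun t => t ≠ "") with htags
  by_cases h : tags = []
  · simp [h]
  · simp only [if_neg h]
    rw [pvMask_eq, pvTable_correct]
    cases h1 : (PySem.Set.ofList tags).contains "mental" <;>
      cases h2 : (PySem.Set.ofList tags).contains "rest" <;>
      cases h3 : (PySem.Set.ofList tags).contains "career" <;>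
      cases h4 : (PySem.Set.ofList tags).contains "courage" <;>
      cases h5 : (PySem.Set.ofList tags).contains "money" <;>
      cases h6 : (PySem.Set.ofList tags).contains "love" <;>
      cases h7 : (PySem.Set.ofList tags).contains "study" <;> simp
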